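-- pv_equiv track=rewrite | github.com/adhithadias/tensor-schedules | src/util.py | get_time_complexity
-- ===== SOURCE A (Python) =====
-- def get_time_complexity(idx_perm: set, input_tensors: list, tensor_idx_order_constraints: dict) -> set:
--     result = {}
--     for idx in idx_perm:
--         added = False
--         for tensor in input_tensors:
--             if tensor not in tensor_idx_order_constraints: break
--             for constraints in tensor_idx_order_constraints[tensor]:
--                 if (constraints[0] == idx):
--                     result[idx] = 1
--                     added = True
--                     break
--             if added: break
--         if ((not added) and (idx not in result)): result[idx] = 0
--     return result
-- ===== SOURCE B (Python) =====
-- def get_time_complexity(idx_perm: set, input_tensors: list, tensor_idx_order_constraints: dict) -> set: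
--     # Pull -> push: initialise every idx to 0, then make ONE pass over the
--     # constraints of the scanned tensor prefix and scatter 1s onto matching keys.
--     result = {idx: 0 for idx in idx_perm}
--     prefix = []
--     for tensor in input_tensors:
--         if tensor not in tensor_idx_order_constraints:
--             break
--         prefix.append(tensor)
--     for tensor in prefix:
--         for c in tensor_idx_order_constraints[tensor]:
--             if c[0] in result:
--                 result[c[0]] = 1
--     return result
-- ===== Notes on version B (the rewrite author's own statement) =====
-- stated objective: alternative
-- what changed: Replaced the per-idx pull (for each idx, re-scan the tensor prefix and its constraints with break flags) by a push: initialise all idx to 0 once, compute the scanned tensor prefix once, then a single pass over that prefix's constraints scatters 1 onto each matching key.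
-- outside the precondition, e.g. on get_time_complexity({'i'}, ['t'], {'t': [['i'], []]}): A returns {'i': 1}, B raises IndexError
import Mathlib
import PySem

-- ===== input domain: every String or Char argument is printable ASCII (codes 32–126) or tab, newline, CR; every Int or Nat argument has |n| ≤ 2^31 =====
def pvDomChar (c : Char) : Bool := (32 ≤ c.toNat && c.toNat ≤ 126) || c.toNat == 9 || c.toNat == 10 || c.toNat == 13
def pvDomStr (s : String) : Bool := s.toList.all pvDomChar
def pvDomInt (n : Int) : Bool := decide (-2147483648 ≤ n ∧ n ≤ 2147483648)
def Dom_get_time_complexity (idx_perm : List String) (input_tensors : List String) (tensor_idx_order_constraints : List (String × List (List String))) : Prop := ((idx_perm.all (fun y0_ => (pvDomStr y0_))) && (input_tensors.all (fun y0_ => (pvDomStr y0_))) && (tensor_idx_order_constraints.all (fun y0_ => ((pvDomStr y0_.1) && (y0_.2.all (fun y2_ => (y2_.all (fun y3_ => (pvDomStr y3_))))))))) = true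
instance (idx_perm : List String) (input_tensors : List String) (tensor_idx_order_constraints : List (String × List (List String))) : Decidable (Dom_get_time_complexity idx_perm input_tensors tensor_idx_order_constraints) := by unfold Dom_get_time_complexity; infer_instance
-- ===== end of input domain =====

-- B replaces A's per-idx pull loops by: init all keys to 0, compute the constrained
-- tensor prefix once, then one scatter pass over that prefix's constraints.

-- ===== PORT A =====
-- inner 'for constraints in tensor_idx_order_constraints[tensor]' loop with its break
def pvA_constrLoop (idx : String) (cs : List (List String)) (result : PySem.Dict String Int) : PySem.Dict String Int × Bool :=
  match cs with
  | [] => (result, false)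
  | c :: rest =>
    match PySem.List.pyGet? c 0 with
    | some h => if h == idx then (result.insert idx 1, true) else pvA_constrLoop idx rest result
    | none => pvA_constrLoop idx rest result  -- Python raises IndexError here; Pre_ excludes it

-- middle 'for tensor in input_tensors' loop with its two breaks
def pvA_tensorLoop (idx : String) (ts : List String) (cons : PySem.Dict String (List (List String))) (result : PySem.Dict String Int) : PySem.Dict String Int × Bool :=
  match ts with
  | [] => (result, false)
  | t :: rest =>
    if cons.contains t = false then (result, false)
    else
      let p := pvA_constrLoop idx (cons.getD t []) result
      if p.2 then (p.1, true) else pvA_tensorLoop idx rest cons p.1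

def get_time_complexity (idx_perm : List String) (input_tensors : List String) (tensor_idx_order_constraints : List (String × List (List String))) : List (String × Int) :=
  let cons := PySem.Dict.ofList tensor_idx_order_constraints
  let result := idx_perm.foldl (fun result idx =>
    let p := pvA_tensorLoop idx input_tensors cons result
    if !p.2 && !(p.1.contains idx) then p.1.insert idx 0 else p.1) PySem.Dict.empty
  result.items

-- ===== PORT B =====
-- 'break at first tensor not in the dict' prefix
def pvB_prefix (ts : List String) (cons : PySem.Dict String (List (List String))) : List String :=
  match ts with
  | [] => []
  | t :: rest => if cons.contains t then t :: pvB_prefix rest cons else []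

-- one scatter step: 'if c[0] in result: result[c[0]] = 1'
def pvB_step (d : PySem.Dict String Int) (c : List String) : PySem.Dict String Int :=
  match PySem.List.pyGet? c 0 with
  | some h => if d.contains h then d.insert h 1 else d
  | none => d  -- Python raises IndexError here; Pre_ excludes it

def get_time_complexity_alt (idx_perm : List String) (input_tensors : List String) (tensor_idx_order_constraints : List (String × List (List String))) : List (String × Int) :=
  let cons := PySem.Dict.ofList tensor_idx_order_constraints
  let result0 := idx_perm.foldl (fun d idx => d.insert idx 0) PySem.Dict.empty
  let pre := pvB_prefix input_tensors cons
  let result := pre.foldl (fun d t => (cons.getD t []).foldl pvB_step d) result0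
  result.items

-- ===== PRECONDITION & SPEC =====
-- Pre_ excludes inputs whose scanned tensor prefix (input_tensors up to the first
-- tensor not in the dict) carries an empty constraint list: Python's constraints[0]
-- raises IndexError on such a list wherever either program reaches it, and A's early
-- break can return while B's full prefix pass still hits it (see cite).
-- The Nodup conjunct only states the representation invariant of a Python set
-- (distinct elements); it excludes no input a Python caller can form.
def Pre_get_time_complexity (idx_perm : List String) (input_tensors : List String) (tensor_idx_order_constraints : List (String × List (List String))) : Prop :=
  idx_perm.Nodup ∧
    ∀ t ∈ input_tensors.takeWhile (fun t => tensor_idx_order_constraints.any (·.1 == t)),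
      ∀ p ∈ tensor_idx_order_constraints, p.1 = t → ∀ c ∈ p.2, c ≠ []
instance (idx_perm : List String) (input_tensors : List String) (tensor_idx_order_constraints : List (String × List (List String))) : Decidable (Pre_get_time_complexity idx_perm input_tensors tensor_idx_order_constraints) := by unfold Pre_get_time_complexity; infer_instance

def pvWitness_get_time_complexity : List String × List String × (List (String × List (List String))) :=
  (["i", "j"], ["t", "u"], [("t", [["i", "k"]])])

def Spec_get_time_complexity (idx_perm : List String) (input_tensors : List String) (tensor_idx_order_constraints : List (String × List (List String))) (out : List (String × Int)) : Prop := out = get_time_complexity_alt idx_perm input_tensors tensor_idx_order_constraints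
instance (idx_perm : List String) (input_tensors : List String) (tensor_idx_order_constraints : List (String × List (List String))) (out : List (String × Int)) : Decidable (Spec_get_time_complexity idx_perm input_tensors tensor_idx_order_constraints out) := by unfold Spec_get_time_complexity; infer_instance

-- ===== CLAIM (what is proved, stated in full; the proofs are below) =====
def Claim_equal_get_time_complexity : Prop := ∀ (idx_perm : List String) (input_tensors : List String) (tensor_idx_order_constraints : List (String × List (List String))), Dom_get_time_complexity idx_perm input_tensors tensor_idx_order_constraints → Pre_get_time_complexity idx_perm input_tensors tensor_idx_order_constraints → Spec_get_time_complexity idx_perm input_tensors tensor_idx_order_constraints (get_time_complexity idx_perm input_tensors tensor_idx_order_constraints)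

-- ===== LEMMAS AND PROOFS =====

-- the shared "idx is hit" predicate: some constraint of the scanned prefix has head idx
def pvHit (cons : PySem.Dict String (List (List String))) (pre : List String) (idx : String) : Bool :=
  pre.any (fun t => (cons.getD t []).any (fun c => PySem.List.pyGet? c 0 == some idx))

theorem pvA_constrLoop_eq (idx : String) (cs : List (List String)) (result : PySem.Dict String Int) :
    pvA_constrLoop idx cs result =
      if cs.any (fun c => PySem.List.pyGet? c 0 == some idx) then (result.insert idx 1, true) else (result, false) := by
  induction cs with
  | nil => simp [pvA_constrLoop]
  | cons c rest ih =>
    cases hg : PySem.List.pyGet? c 0 with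
    | none => simp [pvA_constrLoop, hg, ih]
    | some v =>
      by_cases hv : v = idx
      · subst hv; simp [pvA_constrLoop, hg]
      · simp [pvA_constrLoop, hg, hv, ih]

theorem pvA_tensorLoop_eq (idx : String) (ts : List String) (cons : PySem.Dict String (List (List String))) (result : PySem.Dict String Int) :
    pvA_tensorLoop idx ts cons result =
      if pvHit cons (pvB_prefix ts cons) idx then (result.insert idx 1, true) else (result, false) := by
  induction ts generalizing result with
  | nil => simp [pvA_tensorLoop, pvB_prefix, pvHit]
  | cons t rest ih =>
    by_cases hc : cons.contains t = true
    · simp only [pvA_tensorLoop, pvB_prefix, hc, Bool.true_eq_false, if_false, if_true,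
        pvA_constrLoop_eq]
      by_cases hin : (cons.getD t []).any (fun c => PySem.List.pyGet? c 0 == some idx)
      · simp [pvHit, hin]
      · simpa [pvHit, hin] using ih result
    · simp only [Bool.not_eq_true] at hc
      simp [pvA_tensorLoop, pvB_prefix, hc, pvHit]

-- A's outer loop: starting from a dict containing none of the remaining idx's,
-- it appends (idx, 1-or-0) for each idx in order.
theorem pvA_fold_items (cons : PySem.Dict String (List (List String))) (ts : List String)
    (idxs : List String) (d : PySem.Dict String Int)
    (hnd : idxs.Nodup) (hfree : ∀ i ∈ idxs, d.contains i = false) :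
    (idxs.foldl (fun result idx =>
        let p := pvA_tensorLoop idx ts cons result
        if !p.2 && !(p.1.contains idx) then p.1.insert idx 0 else p.1) d).items =
      d.items ++ idxs.map (fun i => (i, if pvHit cons (pvB_prefix ts cons) i then (1 : Int) else 0)) := by
  induction idxs generalizing d with
  | nil => simp
  | cons i rest ih =>
    have hfi : d.contains i = false := hfree i (List.mem_cons_self)
    have hfree' : ∀ j ∈ rest, (d.insert i (if pvHit cons (pvB_prefix ts cons) i then (1 : Int) else 0)).contains j = false := by
      intro j hj
      rw [PySem.Dict.contains_insert]
      have : j ≠ i := fun h => (List.nodup_cons.mp hnd).1 (h ▸ hj)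
      simp [this, hfree j (List.mem_cons_of_mem _ hj)]
    have step : (let p := pvA_tensorLoop i ts cons d
        if !p.2 && !(p.1.contains i) then p.1.insert i 0 else p.1) =
        d.insert i (if pvHit cons (pvB_prefix ts cons) i then (1 : Int) else 0) := by
      rw [pvA_tensorLoop_eq]
      by_cases hh : pvHit cons (pvB_prefix ts cons) i = true
      · simp [hh]
      · simp only [Bool.not_eq_true] at hh
        simp [hh, hfi]
    rw [List.foldl_cons, step, ih _ (List.nodup_cons.mp hnd).2 hfree',
      PySem.Dict.items_insert_of_not_contains _ _ hfi]
    simp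

-- B side: pvB_step preserves the key list …
theorem pvB_step_keys (d : PySem.Dict String Int) (c : List String) : (pvB_step d c).keys = d.keys := by
  unfold pvB_step
  cases PySem.List.pyGet? c 0 with
  | none => rfl
  | some h =>
    by_cases hc : d.contains h
    · simp [hc, PySem.Dict.keys_insert_of_contains _ _ hc]
    · simp [hc]

theorem pvB_foldl_step_keys (cs : List (List String)) (d : PySem.Dict String Int) :
    (cs.foldl pvB_step d).keys = d.keys := by
  induction cs generalizing d with
  | nil => rfl
  | cons c rest ih => rw [List.foldl_cons, ih, pvB_step_keys]

theorem pvB_outer_keys (cons : PySem.Dict String (List (List String))) (pre : List String) (d : PySem.Dict String Int) :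
    (pre.foldl (fun d t => (cons.getD t []).foldl pvB_step d) d).keys = d.keys := by
  induction pre generalizing d with
  | nil => rfl
  | cons t rest ih => rw [List.foldl_cons, ih, pvB_foldl_step_keys]

-- … and its value at k after a pass over cs
theorem pvB_foldl_step_getD (cs : List (List String)) (d : PySem.Dict String Int) (k : String) :
    (cs.foldl pvB_step d).getD k 0 =
      if cs.any (fun c => PySem.List.pyGet? c 0 == some k) && d.contains k then 1 else d.getD k 0 := by
  induction cs generalizing d with
  | nil => simp
  | cons c rest ih =>
    rw [List.foldl_cons, ih]
    unfold pvB_step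
    cases hg : PySem.List.pyGet? c 0 with
    | none => simp [hg]
    | some h =>
      by_cases hc : d.contains h
      · have hck : ∀ k', (d.insert h 1).contains k' = (k' == h || d.contains k') :=
          fun k' => PySem.Dict.contains_insert d h k' 1
        by_cases hk : k = h
        · subst hk
          simp [hg, hc, hck, PySem.Dict.getD_insert_self]
        · have hne : k ≠ h := hk
          have hne' : h ≠ k := fun e => hne e.symm
          simp [hg, hck, PySem.Dict.getD_insert_of_ne _ _ _ hne,
            Bool.beq_eq_decide_eq, hne', hc, hk]
      · by_cases hk : k = h
        · subst hk; simp [hg, hc]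
        · have hne : h ≠ k := fun e => hk e.symm
          simp [hg, hc, Bool.beq_eq_decide_eq, hne]

theorem pvB_outer_getD (cons : PySem.Dict String (List (List String))) (pre : List String) (d : PySem.Dict String Int) (k : String) :
    (pre.foldl (fun d t => (cons.getD t []).foldl pvB_step d) d).getD k 0 =
      if pvHit cons pre k && d.contains k then 1 else d.getD k 0 := by
  induction pre generalizing d with
  | nil => simp [pvHit]
  | cons t rest ih =>
    rw [List.foldl_cons, ih]
    have hck : ((cons.getD t []).foldl pvB_step d).contains k = d.contains k := by
      rw [PySem.Dict.contains_eq_decide_mem_keys, PySem.Dict.contains_eq_decide_mem_keys,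
        pvB_foldl_step_keys]
    rw [hck, pvB_foldl_step_getD]
    by_cases hc : d.contains k
    · by_cases h1 : (cons.getD t []).any (fun c => PySem.List.pyGet? c 0 == some k)
      · simp [pvHit, h1, hc]
      · simp [pvHit, h1, hc]
    · simp only [Bool.not_eq_true] at hc
      simp [pvHit, hc]

-- the initial comprehension {idx: 0 for idx in idx_perm}
theorem pvB_init_items (idxs : List String) (hnd : idxs.Nodup) :
    (idxs.foldl (fun d idx => d.insert idx 0) (PySem.Dict.empty : PySem.Dict String Int)).items =
      idxs.map (fun i => (i, (0 : Int))) := by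
  have := PySem.Dict.items_foldl_insert_fresh (d := (PySem.Dict.empty : PySem.Dict String Int))
    (l := idxs) (k := fun i => i) (v := fun _ => (0 : Int))
    (by intro a _; exact PySem.Dict.contains_empty a) (by simpa using hnd)
  simpa using this

-- ===== VERDICT (by name: the statement is the Claim_ definition above) =====
theorem get_time_complexity_spec : Claim_equal_get_time_complexity := by
  intro idx_perm input_tensors tioc _ hpre
  obtain ⟨hnd, -⟩ := hpre
  show _ = _
  unfold get_time_complexity get_time_complexity_alt
  set cons := PySem.Dict.ofList tioc with hcons
  set pre := pvB_prefix input_tensors cons with hpre'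
  -- A's items
  rw [pvA_fold_items cons input_tensors idx_perm PySem.Dict.empty hnd
    (fun i _ => PySem.Dict.contains_empty i)]
  -- B's items
  set result0 := idx_perm.foldl (fun d idx => d.insert idx 0) (PySem.Dict.empty : PySem.Dict String Int) with hr0
  set final := pre.foldl (fun d t => (cons.getD t []).foldl pvB_step d) result0 with hfin
  have hitems0 : result0.items = idx_perm.map (fun i => (i, (0 : Int))) := pvB_init_items idx_perm hnd
  have hkeys0 : result0.keys = idx_perm := by
    simp [PySem.Dict.keys, hitems0, Function.comp_def]
  have hkeysF : final.keys = idx_perm := by rw [hfin, pvB_outer_keys, hkeys0]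
  have hndF : final.keys.Nodup := hkeysF ▸ hnd
  rw [PySem.Dict.items_eq_map_keys final hndF 0, hkeysF]
  have hie : (PySem.Dict.empty : PySem.Dict String Int).items = [] := rfl
  simp only [hie, List.nil_append]
  apply List.map_congr_left
  intro i hi
  have hci : result0.contains i = true := by
    rw [PySem.Dict.contains_eq_decide_mem_keys, hkeys0]; simpa using hi
  have hgi : result0.getD i 0 = 0 := by
    exact PySem.Dict.getD_of_mem_items _ (by rw [hitems0]; exact List.mem_map_of_mem hi)
      (hkeys0 ▸ hnd) 0
  rw [hfin, pvB_outer_getD, hci, hgi]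
  by_cases hh : pvHit cons pre i <;> simp [← hpre', hh]
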